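-- pv_equiv track=rewrite | github.com/zaphB/freecad.optics_design_workbench | src/optics_design_workbench/io.py | _indentMsg
-- ===== SOURCE A (Python) =====
-- def _indentMsg(msg):
--   ls = [l for l in '\n'.join([str(l) for l in msg]).split('\n') if l.strip()]
--   if len(ls) == 0:
--     return ''
--   if len(ls) == 1:
--     return ls[0]
--   elif len(ls) == 2:
--     return ls[0]+'\n'+' '*2+r'\ '+ls[1]
--   else:
--     return ('\n'+' '*2+'| ').join(ls[:-1])+'\n'+' '*2+r'\ '+ls[-1]
-- ===== SOURCE B (Python) =====
-- def _indentMsg(msg):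
--   ls = [l for l in '\n'.join([str(l) for l in msg]).split('\n') if l.strip()]
--   if not ls:
--     return ''
--   last = len(ls) - 1
--   out = []
--   for i, l in enumerate(ls):
--     if i == 0:
--       out.append(l)
--     elif i == last:
--       out.append('  \\ ' + l)
--     else:
--       out.append('  | ' + l)
--   return '\n'.join(out)
-- ===== Notes on version B (the rewrite author's own statement) =====
-- stated objective: simpler
-- what changed: Replaces A's len-count case dispatch with slicing and a separator-join by one uniform positional loop over enumerate(ls) that prefixes each line by its role (first bare, last ' \ ', middle ' | ') and joins with newlines.
import Mathlib
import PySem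

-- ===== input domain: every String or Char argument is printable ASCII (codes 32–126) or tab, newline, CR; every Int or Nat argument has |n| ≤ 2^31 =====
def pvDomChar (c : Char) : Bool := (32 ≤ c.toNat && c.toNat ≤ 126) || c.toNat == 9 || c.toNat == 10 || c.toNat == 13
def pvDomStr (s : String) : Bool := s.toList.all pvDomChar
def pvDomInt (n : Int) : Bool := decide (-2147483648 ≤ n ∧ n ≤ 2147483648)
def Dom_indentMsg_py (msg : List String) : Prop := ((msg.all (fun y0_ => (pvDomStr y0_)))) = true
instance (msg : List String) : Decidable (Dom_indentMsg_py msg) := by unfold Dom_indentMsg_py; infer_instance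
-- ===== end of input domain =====

-- B replaces A's count-case dispatch (slicing + separator-join) with one uniform positional
-- loop over enumerate(ls); objective: simpler. A is total; return values only (no mutation).

-- ===== PORT A =====
-- ls = [l for l in '\n'.join([str(l) for l in msg]).split('\n') if l.strip()]
-- then dispatch on len(ls): 0 → '', 1 → ls[0], 2 → ls[0]+'\n'+'  '+'\ '+ls[1],
-- else ('\n'+'  '+'| ').join(ls[:-1])+'\n'+'  '+'\ '+ls[-1]
def indentMsg_py (msg : List String) : String :=
  let ls := ((PySem.Str.split? (PySem.Str.join "\n" msgmap) "\n").getD []).filter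
      (fun l => !(PySem.Str.strip l == ""))
  if ls.length = 0 then ""
  else if ls.length = 1 then PySem.List.pyGetD ls 0 ""
  else if ls.length = 2 then
    PySem.List.pyGetD ls 0 "" ++ "\n" ++ "  " ++ "\\ " ++ PySem.List.pyGetD ls 1 ""
  else
    PySem.Str.join ("\n" ++ "  " ++ "| ") (PySem.List.slice ls none (some (-1)))
      ++ "\n" ++ "  " ++ "\\ " ++ PySem.List.pyGetD ls (-1) ""
where msgmap := msg   -- str(l) on a str is the identity

-- ===== PORT B =====
-- same ls; if not ls: ''; else one loop over enumerate(ls): i==0 → bare line,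
-- i==last → '  \ '+l, else '  | '+l, collected into out; return '\n'.join(out)
def indentMsg_py_alt (msg : List String) : String :=
  let ls := ((PySem.Str.split? (PySem.Str.join "\n" msg) "\n").getD []).filter
      (fun l => !(PySem.Str.strip l == ""))
  if ls = [] then ""
  else
    let last : Int := (ls.length : Int) - 1
    let out := (PySem.List.enumerate ls).foldl
      (fun acc p =>
        if p.1 = 0 then acc ++ [p.2]
        else if p.1 = last then acc ++ ["  \\ " ++ p.2]
        else acc ++ ["  | " ++ p.2]) []
    PySem.Str.join "\n" out

-- ===== PRECONDITION & SPEC =====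
def Spec_indentMsg_py (msg : List String) (out : String) : Prop := out = indentMsg_py_alt msg
instance (msg : List String) (out : String) : Decidable (Spec_indentMsg_py msg out) := by
  unfold Spec_indentMsg_py; infer_instance

-- ===== CLAIM (what is proved, stated in full; the proofs are below) =====
def Claim_equal_indentMsg_py : Prop :=
  ∀ (msg : List String), Dom_indentMsg_py msg → Spec_indentMsg_py msg (indentMsg_py msg)

-- ===== LEMMAS AND PROOFS =====

-- B's loop over enumerate (cs ++ [z]) s, started past index 0, appends '  | ' to each of cs
-- and '  \ ' to z (L is the index of z).
theorem foldB (cs : List String) (z : String) (s L : Int) (acc : List String)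
    (hs : 1 ≤ s) (hL : L = s + cs.length) :
    (PySem.List.enumerate (cs ++ [z]) s).foldl
      (fun acc p =>
        if p.1 = 0 then acc ++ [p.2]
        else if p.1 = L then acc ++ ["  \\ " ++ p.2]
        else acc ++ ["  | " ++ p.2]) acc
    = acc ++ cs.map (fun c => "  | " ++ c) ++ ["  \\ " ++ z] := by
  induction cs generalizing s acc with
  | nil =>
      simp only [List.length_nil, Nat.cast_zero, add_zero] at hL
      rw [List.nil_append, PySem.List.enumerate_cons, PySem.List.enumerate_nil]
      simp only [List.foldl_cons, List.foldl_nil]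
      have h0 : ¬ (s = 0) := by omega
      rw [if_neg h0, if_pos hL.symm]
      simp
  | cons c cs ih =>
      simp only [List.length_cons, Nat.cast_add, Nat.cast_one] at hL
      rw [List.cons_append, PySem.List.enumerate_cons]
      simp only [List.foldl_cons]
      have h0 : ¬ (s = 0) := by omega
      have h1 : ¬ (s = L) := by omega
      rw [if_neg h0, if_neg h1, ih (s + 1) (acc ++ ["  | " ++ c]) (by omega) (by omega)]
      simp

-- a common prefix of the head factors out of a join
theorem join_head_append (sep P C : List Char) (CS : List (List Char)) :
    PySem.Chars.join sep ((P ++ C) :: CS) = P ++ PySem.Chars.join sep (C :: CS) := by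
  cases CS with
  | nil => rw [PySem.Chars.join_singleton, PySem.Chars.join_singleton]
  | cons D DS => rw [PySem.Chars.join_cons_cons, PySem.Chars.join_cons_cons]; simp

-- the joined shapes agree, at the character-list level
theorem charsJoin (A Z : List Char) (CS : List (List Char)) :
    PySem.Chars.join "\n".toList
        (A :: (CS.map (fun c => "  | ".toList ++ c) ++ ["  \\ ".toList ++ Z]))
    = PySem.Chars.join ("\n" ++ "  " ++ "| ").toList (A :: CS) ++ "\n".toList
        ++ "  ".toList ++ "\\ ".toList ++ Z := by
  induction CS generalizing A with
  | nil =>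
      rw [List.map_nil, List.nil_append, PySem.Chars.join_cons_cons,
        PySem.Chars.join_singleton, PySem.Chars.join_singleton]
      simp
  | cons C CS ih =>
      rw [List.map_cons, List.cons_append, PySem.Chars.join_cons_cons,
        PySem.Chars.join_cons_cons, ih ("  | ".toList ++ C),
        join_head_append ("\n" ++ "  " ++ "| ").toList "  | ".toList C CS]
      simp

theorem bodyEq (ls : List String) :
    (if ls.length = 0 then ""
     else if ls.length = 1 then PySem.List.pyGetD ls 0 ""
     else if ls.length = 2 then
       PySem.List.pyGetD ls 0 "" ++ "\n" ++ "  " ++ "\\ " ++ PySem.List.pyGetD ls 1 ""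
     else
       PySem.Str.join ("\n" ++ "  " ++ "| ") (PySem.List.slice ls none (some (-1)))
         ++ "\n" ++ "  " ++ "\\ " ++ PySem.List.pyGetD ls (-1) "")
    = (if ls = [] then ""
       else
         PySem.Str.join "\n" ((PySem.List.enumerate ls).foldl
           (fun acc p =>
             if p.1 = 0 then acc ++ [p.2]
             else if p.1 = ((ls.length : Int) - 1) then acc ++ ["  \\ " ++ p.2]
             else acc ++ ["  | " ++ p.2]) [])) := by
  match ls with
  | [] => rfl
  | [a] =>
      rw [PySem.List.enumerate_cons, PySem.List.enumerate_nil]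
      simp [PySem.List.pyGetD_zero_cons]
      apply String.toList_injective
      rw [PySem.Str.toList_join]
      simp [PySem.Chars.join_singleton]
  | a :: b :: rest' =>
      obtain ⟨cs, z, hrw⟩ : ∃ cs z, b :: rest' = cs ++ [z] := by
        rcases List.eq_nil_or_concat (b :: rest') with h | ⟨cs, z, h⟩
        · simp at h
        · exact ⟨cs, z, by rw [h, List.concat_eq_append]⟩
      rw [hrw]
      -- evaluate B's loop
      have hne : a :: (cs ++ [z]) ≠ [] := by simp
      rw [if_neg hne, PySem.List.enumerate_cons]
      simp only [List.foldl_cons]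
      norm_num
      rw [foldB cs z 1 ((cs.length : Int) + 1) [a] (by omega) (by ring)]
      -- evaluate A's dispatch (norm_num has already discharged the length-0/1 branches)
      have hlast : PySem.List.pyGetD (a :: (cs ++ [z])) (-1) "" = z := by
        have h : a :: (cs ++ [z]) = (a :: cs) ++ [z] := by simp
        rw [h, PySem.List.pyGetD_neg_one_append_singleton]
      have hdrop : PySem.List.slice (a :: (cs ++ [z])) none (some (-1)) = a :: cs := by
        rw [PySem.List.slice_to_neg_one]
        have h : a :: (cs ++ [z]) = (a :: cs) ++ [z] := by simp
        rw [h, List.dropLast_concat]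
      by_cases hcs : cs = []
      · subst hcs
        simp only [List.length_nil, List.nil_append]
        norm_num
        have h1 : PySem.List.pyGetD (a :: [z]) 1 "" = z := by
          simp [PySem.List.pyGetD]
        rw [h1]
        apply String.toList_injective
        simp only [String.toList_append, PySem.Str.toList_join, List.map_cons, List.map_nil]
        rw [PySem.Chars.join_cons_cons, PySem.Chars.join_singleton]
        simp
      · have hl : cs.length ≠ 0 := fun h => hcs (List.eq_nil_of_length_eq_zero h)
        rw [if_neg (by omega), hlast, hdrop]
        apply String.toList_injective
        simp only [String.toList_append, PySem.Str.toList_join, List.map_cons, List.map_nil,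
          List.map_append, List.map_map]
        have hc := charsJoin a.toList z.toList (cs.map String.toList)
        simp only [String.toList_append, List.map_map] at hc
        rw [← hc]
        congr 2
        simp [Function.comp, String.toList_append]

-- ===== VERDICT (by name: the statement is the Claim_ definition above) =====
theorem indentMsg_py_spec : Claim_equal_indentMsg_py := by
  intro msg _
  unfold Spec_indentMsg_py indentMsg_py indentMsg_py_alt indentMsg_py.msgmap
  exact bodyEq _
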